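-- pv_equiv track=rewrite | github.com/asweigart/programmedpatterns | book/visualpatterns.py | pattern23b
-- ===== SOURCE A (Python) =====
-- def pattern23b(step):
--     increments = [1, 2]
--     incIndex = 0
--
--     pattern = 'O'
--     i = 1
--     while i < step:
--         pattern += 'O' * increments[incIndex]
--         i += 1
--         incIndex += 1
--         if incIndex >= 2:
--             incIndex = 0  # Reset incIndex back to 0.
--     return pattern
-- ===== SOURCE B (Python) =====
-- def pattern23b(step):
--     k = step - 1
--     if k < 0:
--         k = 0
--     count = 1 + 3 * (k // 2) + k % 2
--     return (b'O' * count).decode('ascii')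
-- ===== Notes on version B (the rewrite author's own statement) =====
-- stated objective: faster
-- what changed: Replaces the while-loop with repeated string concatenation by a closed-form count (1 + 3*(k//2) + k%2 for k = max(0, step-1)) and a single 'O'*count string repetition.
import Mathlib
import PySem

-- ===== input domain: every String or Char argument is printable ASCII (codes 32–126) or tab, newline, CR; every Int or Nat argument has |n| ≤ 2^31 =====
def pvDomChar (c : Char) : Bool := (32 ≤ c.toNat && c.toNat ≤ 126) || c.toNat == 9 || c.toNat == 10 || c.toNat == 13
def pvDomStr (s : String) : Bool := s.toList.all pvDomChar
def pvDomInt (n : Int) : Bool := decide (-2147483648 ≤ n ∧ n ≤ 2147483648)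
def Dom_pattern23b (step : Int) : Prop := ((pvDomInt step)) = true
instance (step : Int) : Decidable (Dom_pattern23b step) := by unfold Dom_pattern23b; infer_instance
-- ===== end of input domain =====

-- B replaces A's while-loop of repeated concatenation with a closed-form count and one repetition (objective: faster).

-- ===== PORT A =====
-- the while-loop of A, step for step: append increments[incIndex] O's, bump i and incIndex, reset incIndex at 2
def pattern23bLoop (step i incIndex : Int) (pattern : String) : String :=
  if i < step then
    let pattern := pattern ++ String.ofList (PySem.List.pyRepeat ['O'] (PySem.List.pyGetD [(1:Int), 2] incIndex 0))
    let i := i + 1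
    let incIndex := incIndex + 1
    let incIndex := if incIndex ≥ 2 then 0 else incIndex
    pattern23bLoop step i incIndex pattern
  else pattern
termination_by (step - i).toNat
decreasing_by omega

def pattern23b (step : Int) : String :=
  pattern23bLoop step 1 0 "O"

-- ===== PORT B =====
-- (b'O' * count).decode('ascii') is count copies of 'O': ported as the singleton repetition
def pattern23b_alt (step : Int) : String :=
  let k := if step - 1 < 0 then 0 else step - 1
  let count := 1 + 3 * PySem.Int.floordiv k 2 + PySem.Int.mod k 2
  String.ofList (PySem.List.pyRepeat ['O'] count)

-- ===== PRECONDITION & SPEC =====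
def Spec_pattern23b (step : Int) (out : String) : Prop := out = pattern23b_alt step
instance (step : Int) (out : String) : Decidable (Spec_pattern23b step out) := by unfold Spec_pattern23b; infer_instance

-- ===== CLAIM (what is proved, stated in full; the proofs are below) =====
def Claim_equal_pattern23b : Prop := ∀ (step : Int), Dom_pattern23b step → Spec_pattern23b step (pattern23b step)

-- ===== LEMMAS AND PROOFS =====

-- what the loop appends over n remaining iterations, starting from incIndex inc
def pvSpin : Nat → Int → List Char
  | 0, _ => []
  | n + 1, inc =>
      (if inc = 0 then ['O'] else ['O', 'O']) ++ pvSpin n (if inc = 0 then 1 else 0)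

theorem pvLoop_eq_spin (step : Int) : ∀ (n : Nat) (i inc : Int) (pat : List Char),
    (step - i).toNat = n → (inc = 0 ∨ inc = 1) →
    pattern23bLoop step i inc (String.ofList pat) = String.ofList (pat ++ pvSpin n inc) := by
  intro n
  induction n with
  | zero =>
    intro i inc pat hn hinc
    rw [pattern23bLoop]
    have : ¬ i < step := by omega
    simp [this, pvSpin]
  | succ n ih =>
    intro i inc pat hn hinc
    rw [pattern23bLoop]
    have hlt : i < step := by omega
    simp only [hlt, if_true]
    rcases hinc with h | h
    · subst h
      have : (String.ofList pat) ++ String.ofList (PySem.List.pyRepeat ['O'] (PySem.List.pyGetD [(1:Int), 2] 0 0))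
          = String.ofList (pat ++ ['O']) := by
        apply String.toList_injective
        simp [PySem.List.pyRepeat, PySem.List.pyGetD]
      rw [this]
      rw [show (if (0:Int) + 1 ≥ 2 then (0:Int) else 0 + 1) = 1 from rfl]
      rw [ih (i + 1) 1 (pat ++ ['O']) (by omega) (Or.inr rfl)]
      simp [pvSpin]
    · subst h
      have : (String.ofList pat) ++ String.ofList (PySem.List.pyRepeat ['O'] (PySem.List.pyGetD [(1:Int), 2] 1 0))
          = String.ofList (pat ++ ['O', 'O']) := by
        apply String.toList_injective
        simp [PySem.List.pyRepeat, PySem.List.pyGetD]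
      rw [this]
      rw [show (if (1:Int) + 1 ≥ 2 then (0:Int) else 1 + 1) = 0 from rfl]
      rw [ih (i + 1) 0 (pat ++ ['O', 'O']) (by omega) (Or.inl rfl)]
      simp [pvSpin]

-- pvSpin is a block of O's whose length is given by the alternating-sum closed forms
theorem pvSpin_replicate : ∀ (n : Nat),
    pvSpin n 0 = List.replicate (3 * (n / 2) + n % 2) 'O' ∧
    pvSpin n 1 = List.replicate (3 * (n / 2) + 2 * (n % 2)) 'O' := by
  intro n
  induction n with
  | zero => simp [pvSpin]
  | succ n ih =>
    obtain ⟨h0, h1⟩ := ih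
    constructor
    · show (['O'] ++ pvSpin n 1) = _
      rw [h1]
      have : (['O'] : List Char) = List.replicate 1 'O' := rfl
      rw [this, ← List.replicate_add]
      congr 1
      omega
    · show (['O', 'O'] ++ pvSpin n 0) = _
      rw [h0]
      have : (['O', 'O'] : List Char) = List.replicate 2 'O' := rfl
      rw [this, ← List.replicate_add]
      congr 1
      omega

-- ===== VERDICT (by name: the statement is the Claim_ definition above) =====
theorem pattern23b_spec : Claim_equal_pattern23b := by
  intro step _
  show pattern23b step = pattern23b_alt step
  unfold pattern23b pattern23b_alt
  rw [show ("O" : String) = String.ofList ['O'] from rfl]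
  rw [pvLoop_eq_spin step (step - 1).toNat 1 0 ['O'] rfl (Or.inl rfl)]
  set n : Nat := (step - 1).toNat with hn
  show String.ofList (['O'] ++ pvSpin n 0)
      = String.ofList (PySem.List.pyRepeat ['O']
          (1 + 3 * PySem.Int.floordiv (if step - 1 < 0 then 0 else step - 1) 2
             + PySem.Int.mod (if step - 1 < 0 then 0 else step - 1) 2))
  rw [(pvSpin_replicate n).1]
  rw [show (if step - 1 < 0 then (0:Int) else step - 1) = (n : Int) from by omega]
  rw [show PySem.Int.floordiv (n : Int) 2 = ((n / 2 : Nat) : Int) from by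
    exact_mod_cast PySem.Int.floordiv_natCast n 2]
  rw [show PySem.Int.mod (n : Int) 2 = ((n % 2 : Nat) : Int) from by
    exact_mod_cast PySem.Int.mod_natCast n 2]
  rw [show (1 + 3 * ((n / 2 : Nat) : Int) + ((n % 2 : Nat) : Int))
      = ((1 + 3 * (n / 2) + n % 2 : Nat) : Int) from by push_cast; ring]
  rw [PySem.List.pyRepeat_singleton]
  congr 1
  rw [show ((1 + 3 * (n / 2) + n % 2 : Nat) : Int).toNat = 1 + 3 * (n / 2) + n % 2 from by omega]
  rw [show 1 + 3 * (n / 2) + n % 2 = (3 * (n / 2) + n % 2) + 1 from by omega]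
  rw [List.replicate_succ']
  rw [List.singleton_append, ← List.replicate_succ, List.replicate_succ']
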